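-- pv_equiv track=rewrite | github.com/nytud/HunTag3 | features.py | tags_since_dt
-- ===== SOURCE A (Python) =====
-- def tags_since_dt(sentence, tokRange):
--     """
--     Last determinant feature:
--     All the POS tags that occured since the last determinant is joined with '+'
--     Determinant: XXX TODO: Make this a parameter
--     English: 'DT'
--     Hungarian (KR code): '[Tf]'
--
--     Args:
--        sentence (list): List of tokens in the sentence
--        tokRange (int): number of tokens used
--
--     Returns:
--        [Str]: Pass ???
--
--     HunTag:
--         Type: Sentence
--         Field: Analysis
--         Example: ???
--         Use case: Chunk
--     """
--     tags = set()
--     for pos in sentence[:tokRange]: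
--         if pos == '[Tf]':  # [Tf], DT
--             tags = set()
--         else:
--             tags.add(pos)
--     return '+'.join(sorted(tags))
-- ===== SOURCE B (Python) =====
-- def tags_since_dt(sentence, tokRange):
--     tags = set()
--     for pos in reversed(sentence[:tokRange]):
--         if pos == '[Tf]':
--             break
--         tags.add(pos)
--     return '+'.join(sorted(tags))
-- ===== Notes on version B (the rewrite author's own statement) =====
-- stated objective: alternative
-- what changed: Replaces A's forward accumulate-and-reset loop by a backward scan that collects tags from the end of the window and breaks at the first '[Tf]' seen, so no set is ever thrown away.
import Mathlib
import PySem

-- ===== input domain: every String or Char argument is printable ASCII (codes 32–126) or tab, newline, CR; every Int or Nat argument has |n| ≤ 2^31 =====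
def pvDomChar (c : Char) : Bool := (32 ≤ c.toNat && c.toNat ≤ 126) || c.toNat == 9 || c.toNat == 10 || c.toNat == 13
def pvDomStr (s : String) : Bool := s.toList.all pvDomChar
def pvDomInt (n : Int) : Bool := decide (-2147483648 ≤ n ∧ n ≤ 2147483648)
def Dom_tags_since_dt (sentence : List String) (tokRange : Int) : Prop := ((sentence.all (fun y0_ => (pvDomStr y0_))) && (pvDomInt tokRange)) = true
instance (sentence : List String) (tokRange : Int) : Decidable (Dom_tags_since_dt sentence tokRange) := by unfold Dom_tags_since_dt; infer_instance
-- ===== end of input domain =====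

-- B scans the window BACKWARDS, collecting tags until the first '[Tf]' seen from the end (then it
-- breaks), instead of A's forward accumulate-and-reset loop; alternative decomposition, same cost.

-- ===== PORT A =====
def tags_since_dt (sentence : List String) (tokRange : Int) : String :=
  let tags := (PySem.List.slice sentence none (some tokRange)).foldl
    (fun tags pos => if pos == "[Tf]" then PySem.Set.empty else PySem.Set.add tags pos)
    PySem.Set.empty
  PySem.Str.join "+" (PySem.List.sorted tags (fun x => x) false)

-- ===== PORT B =====
-- the 'for pos in reversed(window): if pos == '[Tf]': break; tags.add(pos)' loop
def pvCollectBack : List String → PySem.Set String → PySem.Set String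
  | [], tags => tags
  | pos :: rest, tags =>
      if pos == "[Tf]" then tags else pvCollectBack rest (PySem.Set.add tags pos)

def tags_since_dt_alt (sentence : List String) (tokRange : Int) : String :=
  let tags := pvCollectBack (PySem.List.slice sentence none (some tokRange)).reverse PySem.Set.empty
  PySem.Str.join "+" (PySem.List.sorted tags (fun x => x) false)

-- ===== PRECONDITION & SPEC =====
def Spec_tags_since_dt (sentence : List String) (tokRange : Int) (out : String) : Prop := out = tags_since_dt_alt sentence tokRange
instance (sentence : List String) (tokRange : Int) (out : String) : Decidable (Spec_tags_since_dt sentence tokRange out) := by unfold Spec_tags_since_dt; infer_instance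

-- ===== CLAIM (what is proved, stated in full; the proofs are below) =====
def Claim_equal_tags_since_dt : Prop := ∀ (sentence : List String) (tokRange : Int), Dom_tags_since_dt sentence tokRange → Spec_tags_since_dt sentence tokRange (tags_since_dt sentence tokRange)

-- ===== LEMMAS AND PROOFS =====

-- B's break-loop is Set.update of the initial set with the prefix of ys before the first '[Tf]'.
theorem pvCollectBack_eq_update (ys : List String) (tags : PySem.Set String) :
    pvCollectBack ys tags = PySem.Set.update tags (ys.takeWhile (fun p => p != "[Tf]")) := by
  induction ys generalizing tags with
  | nil => simp [pvCollectBack, PySem.Set.update_nil]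
  | cons y ys ih =>
    by_cases hy : y = "[Tf]"
    · subst hy; simp [pvCollectBack, PySem.Set.update_nil]
    · have : (y == "[Tf]") = false := by simp [hy]
      simp [pvCollectBack, this, ih, PySem.Set.update_cons, hy]

-- A's accumulate-and-reset loop yields a Nodup set whose members are exactly the tokens of xs
-- strictly after the last '[Tf]' — i.e. the members of the '[Tf]'-free prefix of xs.reverse.
theorem pv_A_spec (xs : List String) :
    (xs.foldl (fun tags pos => if pos == "[Tf]" then PySem.Set.empty else PySem.Set.add tags pos)
        PySem.Set.empty).Nodup ∧
    ∀ x, x ∈ xs.foldl (fun tags pos => if pos == "[Tf]" then PySem.Set.empty else PySem.Set.add tags pos)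
        PySem.Set.empty ↔ x ∈ xs.reverse.takeWhile (fun p => p != "[Tf]") := by
  induction xs using List.reverseRecOn with
  | nil => simp [PySem.Set.empty]
  | append_singleton xs y ih =>
    obtain ⟨hnd, hmem⟩ := ih
    rw [List.foldl_append]
    by_cases hy : y = "[Tf]"
    · subst hy; simp [PySem.Set.empty]
    · have hb : (y == "[Tf]") = false := by simp [hy]
      constructor
      · simpa [hy] using PySem.Set.nodup_add _ y hnd
      · intro x
        have h := hmem x
        simp [hy, PySem.Set.mem_add] at h ⊢
        rw [h, or_comm]

-- ===== VERDICT (by name: the statement is the Claim_ definition above) =====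
theorem tags_since_dt_spec : Claim_equal_tags_since_dt := by
  intro sentence tokRange _
  unfold Spec_tags_since_dt tags_since_dt tags_since_dt_alt
  obtain ⟨hndA, hmemA⟩ := pv_A_spec (PySem.List.slice sentence none (some tokRange))
  have hB := pvCollectBack_eq_update (PySem.List.slice sentence none (some tokRange)).reverse
    PySem.Set.empty
  rw [PySem.Set.update_empty] at hB
  simp only [hB]
  congr 1
  apply PySem.List.sorted_eq_sorted_of_perm _ _ _ (fun a b h => h)
  rw [List.perm_ext_iff_of_nodup hndA (PySem.Set.nodup_ofList _)]
  intro x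
  rw [hmemA x, PySem.Set.mem_ofList]
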